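-- pv_equiv track=rewrite | github.com/HumanCellAtlas/data-monitoring-dashboard | tracker/lambdas/api_server/core.py | _parse_by_project_uuid
-- ===== SOURCE A (Python) =====
-- def _parse_by_project_uuid(target_project_dict, source_records_list, table_name):
--     for record in source_records_list:
--         project_uuid = record['project_uuid']
--         if target_project_dict[project_uuid].get(table_name):
--             target_project_dict[project_uuid][table_name].append(record)
--         else:
--             target_project_dict[project_uuid][table_name] = [record]
--
--     return target_project_dict
-- ===== SOURCE B (Python) =====
-- def _parse_by_project_uuid(target_project_dict, source_records_list, table_name):
--     # Pass 1: one dict pass collecting the records of each project_uuid, in order.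
--     groups = {}
--     for record in source_records_list:
--         uuid = record['project_uuid']
--         groups[uuid] = groups.get(uuid, []) + [record]
--     # Pass 2: traverse the TARGET dict once; merge each entry's group (if any)
--     # into its table_name list ('or []' covers both a missing and an empty list).
--     for uuid, inner in target_project_dict.items():
--         group = groups.get(uuid, [])
--         if group:
--             inner[table_name] = (inner.get(table_name) or []) + group
--     return target_project_dict
-- ===== Notes on version B (the rewrite author's own statement) =====
-- stated objective: alternative
-- what changed: Replaces A's per-record dispatch into the target dict (truthiness check + append/assign for every record) with two staged passes: first collect the records of each project_uuid into a groups dict, then traverse the TARGET dict's own entries once, merging each entry's whole group with a single 'or []' concatenation.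
import Mathlib
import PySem

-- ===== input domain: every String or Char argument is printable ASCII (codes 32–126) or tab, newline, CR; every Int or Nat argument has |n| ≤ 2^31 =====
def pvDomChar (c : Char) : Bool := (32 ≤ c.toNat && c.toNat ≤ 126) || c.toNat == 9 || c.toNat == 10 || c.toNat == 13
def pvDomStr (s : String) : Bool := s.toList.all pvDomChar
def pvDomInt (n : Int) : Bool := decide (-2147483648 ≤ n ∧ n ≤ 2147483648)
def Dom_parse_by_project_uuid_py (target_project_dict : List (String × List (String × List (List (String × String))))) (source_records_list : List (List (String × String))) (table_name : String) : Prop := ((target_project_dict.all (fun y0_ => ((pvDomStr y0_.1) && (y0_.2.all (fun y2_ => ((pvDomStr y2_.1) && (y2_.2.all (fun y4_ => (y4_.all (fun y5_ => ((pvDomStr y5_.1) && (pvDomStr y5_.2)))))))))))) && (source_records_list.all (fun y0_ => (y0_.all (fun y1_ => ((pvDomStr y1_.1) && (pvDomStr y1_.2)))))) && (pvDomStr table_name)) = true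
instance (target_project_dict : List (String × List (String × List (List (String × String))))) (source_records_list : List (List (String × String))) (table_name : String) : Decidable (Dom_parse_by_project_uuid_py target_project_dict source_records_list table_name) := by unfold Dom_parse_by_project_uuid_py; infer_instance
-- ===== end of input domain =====

-- ===== PORT A =====
-- B replaces A's per-record dispatch into the target dict by two staged passes
-- (collect each uuid's records once, then traverse the TARGET dict's entries,
-- merging each entry's whole group); equal return value.
-- (In Python both A and B mutate target_project_dict in place and return it;
-- the equivalence proved here is about the return value.)

-- record['project_uuid'] (none = KeyError, excluded by Pre_)
def pvUuid? (r : List (String × String)) : Option String :=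
  (PySem.Dict.mk r).get? "project_uuid"

-- body of A's for-loop: one record processed against the target dict
-- (where Python raises KeyError -- missing 'project_uuid' or unknown uuid -- the state
-- is returned unchanged; those inputs are excluded by Pre_)
def pvStepA (table_name : String) (d : PySem.Dict String (List (String × List (List (String × String))))) (r : List (String × String)) : PySem.Dict String (List (String × List (List (String × String)))) :=
  match pvUuid? r with
  | none => d
  | some uuid =>
    match d.get? uuid with
    | none => d
    | some inner =>
      -- if target_project_dict[uuid].get(table_name):  (truthy = present and nonempty)
      match (PySem.Dict.mk inner).get? table_name with
      | some l =>
        if l.isEmpty then d.insert uuid ((PySem.Dict.mk inner).insert table_name [r]).items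
        else d.insert uuid ((PySem.Dict.mk inner).insert table_name (l ++ [r])).items
      | none => d.insert uuid ((PySem.Dict.mk inner).insert table_name [r]).items

def parse_by_project_uuid_py (target_project_dict : List (String × List (String × List (List (String × String))))) (source_records_list : List (List (String × String))) (table_name : String) : List (String × List (String × List (List (String × String)))) :=
  (source_records_list.foldl (pvStepA table_name) (PySem.Dict.mk target_project_dict)).items

-- ===== PORT B =====
-- pass 1: groups[uuid] = groups.get(uuid, []) + [record]
def pvGroups (source_records_list : List (List (String × String))) : PySem.Dict String (List (List (String × String))) :=
  source_records_list.foldl (fun g r =>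
    match pvUuid? r with
    | some uuid => g.modify uuid [] (· ++ [r])
    | none => g) PySem.Dict.empty

-- pass 2 body: if group: inner[table_name] = (inner.get(table_name) or []) + group
def pvMergeInner (table_name : String) (inner : List (String × List (List (String × String)))) (group : List (List (String × String))) : List (String × List (List (String × String))) :=
  if group.isEmpty then inner
  else ((PySem.Dict.mk inner).insert table_name ((PySem.Dict.mk inner).getD table_name [] ++ group)).items

def parse_by_project_uuid_py_alt (target_project_dict : List (String × List (String × List (List (String × String))))) (source_records_list : List (List (String × String))) (table_name : String) : List (String × List (String × List (List (String × String)))) :=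
  let groups := pvGroups source_records_list
  target_project_dict.map (fun p => (p.1, pvMergeInner table_name p.2 (groups.getD p.1 [])))

-- ===== PRECONDITION & SPEC =====
-- Pre_ excludes (a) the inputs where Python A raises KeyError: a record without a
-- 'project_uuid' key, or whose project_uuid is not a key of target_project_dict; and
-- (b) association lists repeating a top-level uuid key, which no Python dict can
-- represent (duplicate keys collapse at dict construction), so no actual Python input
-- is excluded by (b).
def Pre_parse_by_project_uuid_py (target_project_dict : List (String × List (String × List (List (String × String))))) (source_records_list : List (List (String × String))) (table_name : String) : Prop :=
  (target_project_dict.map Prod.fst).Nodup ∧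
  ∀ r ∈ source_records_list, ((pvUuid? r).any (fun u => (PySem.Dict.mk target_project_dict).contains u)) = true
instance (target_project_dict : List (String × List (String × List (List (String × String))))) (source_records_list : List (List (String × String))) (table_name : String) : Decidable (Pre_parse_by_project_uuid_py target_project_dict source_records_list table_name) := by unfold Pre_parse_by_project_uuid_py; infer_instance

def pvWitness_parse_by_project_uuid_py : (List (String × List (String × List (List (String × String))))) × (List (List (String × String))) × String :=
  ([("u1", [("files", [])])], [[("project_uuid", "u1"), ("name", "x")]], "files")

-- hand-assembled DecidableEq for the deeply nested result type (plain instance search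
-- exceeds its default size limit on this nesting depth)
def pvDecEq2 : DecidableEq (List (List (String × String))) := fun a b => by infer_instance
def pvDecEq4 : DecidableEq (List (String × List (List (String × String)))) :=
  @instDecidableEqList _ (@instDecidableEqProd _ _ _ pvDecEq2)
def pvDecEq6 : DecidableEq (List (String × List (String × List (List (String × String))))) :=
  @instDecidableEqList _ (@instDecidableEqProd _ _ _ pvDecEq4)

def Spec_parse_by_project_uuid_py (target_project_dict : List (String × List (String × List (List (String × String))))) (source_records_list : List (List (String × String))) (table_name : String) (out : List (String × List (String × List (List (String × String))))) : Prop := out = parse_by_project_uuid_py_alt target_project_dict source_records_list table_name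
instance (target_project_dict : List (String × List (String × List (List (String × String))))) (source_records_list : List (List (String × String))) (table_name : String) (out : List (String × List (String × List (List (String × String))))) : Decidable (Spec_parse_by_project_uuid_py target_project_dict source_records_list table_name out) := by unfold Spec_parse_by_project_uuid_py; exact pvDecEq6 _ _

-- ===== CLAIM (what is proved, stated in full; the proofs are below) =====
def Claim_equal_parse_by_project_uuid_py : Prop := ∀ (target_project_dict : List (String × List (String × List (List (String × String))))) (source_records_list : List (List (String × String))) (table_name : String), Dom_parse_by_project_uuid_py target_project_dict source_records_list table_name → Pre_parse_by_project_uuid_py target_project_dict source_records_list table_name → Spec_parse_by_project_uuid_py target_project_dict source_records_list table_name (parse_by_project_uuid_py target_project_dict source_records_list table_name)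

-- ===== LEMMAS AND PROOFS =====

theorem pv_mk_items {κ ν : Type} [BEq κ] (d : PySem.Dict κ ν) : PySem.Dict.mk d.items = d := rfl

-- appending one record to the stream updates the groups dict at that record's uuid
theorem pv_groups_append (srl : List (List (String × String))) (r : List (String × String)) (u : String) (hu : pvUuid? r = some u) :
    pvGroups (srl ++ [r]) = (pvGroups srl).modify u [] (· ++ [r]) := by
  unfold pvGroups
  rw [List.foldl_append, List.foldl_cons, List.foldl_nil, hu]

-- get? through a fst-preserving map of an association list
theorem pv_get?_mk_map {β γ : Type} (l : List (String × β)) (G : String → β → γ) (u : String) :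
    (PySem.Dict.mk (l.map (fun p => (p.1, G p.1 p.2)))).get? u
      = (l.find? (fun p => p.1 == u)).map (fun p => G p.1 p.2) := by
  induction l with
  | nil => rfl
  | cons p rest ih =>
    rw [List.map_cons, PySem.Dict.get?_mk_cons, List.find?_cons]
    by_cases h : p.1 = u
    · simp [h]
    · have hb : (p.1 == u) = false := by simp [h]
      simp [hb, ih]

-- in a list with distinct keys, two members with the same key coincide
theorem pv_eq_of_nodup {β : Type} {l : List (String × β)} (hnd : (l.map Prod.fst).Nodup) {p q : String × β} (hp : p ∈ l) (hq : q ∈ l) (h : p.1 = q.1) : p = q := by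
  induction l with
  | nil => simp at hp
  | cons a rest ih =>
    rw [List.map_cons, List.nodup_cons] at hnd
    rcases List.mem_cons.mp hp with hp1 | hp1 <;> rcases List.mem_cons.mp hq with hq1 | hq1
    · exact hp1.trans hq1.symm
    · exfalso
      apply hnd.1
      have hm : q.1 ∈ rest.map Prod.fst := List.mem_map_of_mem hq1
      rw [hp1] at h
      rw [h]
      exact hm
    · exfalso
      apply hnd.1
      have hm : p.1 ∈ rest.map Prod.fst := List.mem_map_of_mem hp1
      rw [hq1] at h
      rw [← h]
      exact hm
    · exact ih hnd.2 hp1 hq1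

-- A's loop, run on the whole stream, produces exactly B's per-entry merge
theorem pv_main (tn : String) (tpd : List (String × List (String × List (List (String × String))))) (srl : List (List (String × String))) (hnd : (tpd.map Prod.fst).Nodup) (hpre : ∀ r ∈ srl, ((pvUuid? r).any (fun u => (PySem.Dict.mk tpd).contains u)) = true) :
    (srl.foldl (pvStepA tn) (PySem.Dict.mk tpd)).items
      = tpd.map (fun p => (p.1, pvMergeInner tn p.2 ((pvGroups srl).getD p.1 []))) := by
  induction srl using List.reverseRecOn with
  | nil =>
    show tpd = _
    simp [pvGroups, pvMergeInner, PySem.Dict.getD_empty]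
  | append_singleton srl r ih =>
    have hpre' : ∀ x ∈ srl, ((pvUuid? x).any (fun u => (PySem.Dict.mk tpd).contains u)) = true :=
      fun x hx => hpre x (by simp [hx])
    have hr := hpre r (by simp)
    obtain ⟨u, hu, hcont⟩ : ∃ u, pvUuid? r = some u ∧ (PySem.Dict.mk tpd).contains u = true := by
      cases h : pvUuid? r with
      | none => rw [h] at hr; simp at hr
      | some u => exact ⟨u, rfl, by rw [h] at hr; simpa using hr⟩
    have ih := ih hpre'
    -- the unique target entry for u
    have hfind : ∃ q, tpd.find? (fun p => p.1 == u) = some q := by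
      have hk : u ∈ tpd.map Prod.fst := by
        have := (PySem.Dict.contains_iff_mem_keys (PySem.Dict.mk tpd) u).mp hcont
        simpa using this
      rcases List.mem_map.mp hk with ⟨q, hq, hq1⟩
      have : (tpd.find? (fun p => p.1 == u)).isSome := by
        rw [List.find?_isSome]; exact ⟨q, hq, by simp [hq1]⟩
      exact ⟨_, Option.eq_some_of_isSome this⟩
    obtain ⟨q, hq⟩ := hfind
    have hqmem : q ∈ tpd := List.mem_of_find?_eq_some hq
    have hq1 : q.1 = u := by simpa using List.find?_some hq
    set g := pvGroups srl with hg
    set F : String × List (String × List (List (String × String))) → String × List (String × List (List (String × String))) :=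
      fun p => (p.1, pvMergeInner tn p.2 (g.getD p.1 [])) with hF
    -- the state after srl, as a dict of the mapped list
    have hD : srl.foldl (pvStepA tn) (PySem.Dict.mk tpd) = PySem.Dict.mk (tpd.map F) := by
      rw [← pv_mk_items (srl.foldl (pvStepA tn) (PySem.Dict.mk tpd)), ih]
    have hget : (srl.foldl (pvStepA tn) (PySem.Dict.mk tpd)).get? u
        = some (pvMergeInner tn q.2 (g.getD u [])) := by
      rw [hD, hF, pv_get?_mk_map tpd (fun k inner => pvMergeInner tn inner (g.getD k [])) u, hq]
      simp [hq1]
    rw [List.foldl_append, List.foldl_cons, List.foldl_nil]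
    set D := srl.foldl (pvStepA tn) (PySem.Dict.mk tpd) with hDdef
    have hDcont : D.contains u = true := by
      rw [PySem.Dict.contains_eq_isSome_get?, hget]; rfl
    -- A's step at r ends in D.insert u v' for the value v' below
    set old := g.getD u [] with hold
    set prev := (PySem.Dict.mk q.2).getD tn [] with hprev
    have hmerge_new : pvMergeInner tn q.2 (old ++ [r])
        = ((PySem.Dict.mk q.2).insert tn (prev ++ (old ++ [r]))).items := by
      rw [hprev]
      unfold pvMergeInner
      simp
    have hstep : pvStepA tn D r = D.insert u (pvMergeInner tn q.2 (old ++ [r])) := by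
      have hA : pvStepA tn D r = (match (PySem.Dict.mk (pvMergeInner tn q.2 old)).get? tn with
          | some l =>
            if l.isEmpty then D.insert u (((PySem.Dict.mk (pvMergeInner tn q.2 old)).insert tn [r]).items)
            else D.insert u (((PySem.Dict.mk (pvMergeInner tn q.2 old)).insert tn (l ++ [r])).items)
          | none => D.insert u (((PySem.Dict.mk (pvMergeInner tn q.2 old)).insert tn [r]).items)) := by
        unfold pvStepA
        rw [hu]
        dsimp only
        rw [hget]
      rw [hA, hmerge_new]
      by_cases hoe : old.isEmpty
      · have holdnil : old = [] := by simpa [List.isEmpty_iff] using hoe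
        have hmi : pvMergeInner tn q.2 old = q.2 := by unfold pvMergeInner; simp [hoe]
        rw [hmi]
        cases hl : (PySem.Dict.mk q.2).get? tn with
        | none =>
          have : prev = [] := by rw [hprev]; exact PySem.Dict.getD_of_get?_eq_none _ [] hl
          simp [this, holdnil]
        | some l =>
          have hpl : prev = l := by rw [hprev]; exact PySem.Dict.getD_of_get?_eq_some _ [] hl
          by_cases hle : l.isEmpty
          · have : l = [] := by simpa [List.isEmpty_iff] using hle
            simp [hpl, this, holdnil]
          · simp [hle, hpl, holdnil]
      · have hmi : pvMergeInner tn q.2 old = ((PySem.Dict.mk q.2).insert tn (prev ++ old)).items := by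
          rw [hprev]; unfold pvMergeInner; simp [hoe]
        rw [hmi, pv_mk_items, PySem.Dict.get?_insert_self]
        have hne : (prev ++ old).isEmpty = false := by
          have h1 : old ≠ [] := by simpa [List.isEmpty_iff] using hoe
          simp [h1]
        simp [hne, PySem.Dict.insert_insert_self]
    rw [hstep, PySem.Dict.items_insert_of_contains _ _ hDcont, ih, List.map_map]
    refine List.map_congr_left (fun p hp => ?_)
    by_cases hpu : p.1 = u
    · have hpq : p = q := pv_eq_of_nodup hnd hp hqmem (hpu.trans hq1.symm)
      subst hpq
      have hg' : (pvGroups (srl ++ [r])).getD u [] = old ++ [r] := by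
        rw [pv_groups_append srl r u hu, ← hg, PySem.Dict.getD_modify_self, hold]
      simp [hF, Function.comp, hpu, hg']
    · have hg' : (pvGroups (srl ++ [r])).getD p.1 [] = g.getD p.1 [] := by
        rw [pv_groups_append srl r u hu, ← hg]
        exact PySem.Dict.getD_modify_of_ne _ _ _ hpu
      simp [hF, Function.comp, hpu, hg']

-- ===== VERDICT (by name: the statement is the Claim_ definition above) =====
theorem parse_by_project_uuid_py_spec : Claim_equal_parse_by_project_uuid_py := by
  intro tpd srl tn _ hpre
  unfold Spec_parse_by_project_uuid_py parse_by_project_uuid_py parse_by_project_uuid_py_alt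
  exact pv_main tn tpd srl hpre.1 hpre.2
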